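-- pv_equiv track=rewrite | github.com/annavigdis/word-lattices | total_error_statistics.py | find_correct_start
-- ===== SOURCE A (Python) =====
-- def find_correct_start(reference, hypothesis):
--     mismatch = (0, '')
--     for i, word in zip(range(len(reference)), reference):
--         if len(hypothesis) >= i + 1 and word != hypothesis[i]:
--             # the words do not match
--             mismatch = (i, word)
--         elif len(hypothesis) < i + 1 and reference[:len(hypothesis)] == hypothesis:
--             # the hypothesis is shorter than the reference, and everything matches up to the end
--             # so the correct beginning is the hypothesis plus one
--             mismatch = (i, reference[i])
--     # if the hypothesis is longer than the reference,
--     # and no error has been detected up to the end, the reference is returned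
--     return mismatch
-- ===== SOURCE B (Python) =====
-- def find_correct_start(reference, hypothesis):
--     # Scan backwards over the overlap for the last mismatching position.
--     i = min(len(reference), len(hypothesis))
--     while i > 0:
--         i -= 1
--         if reference[i] != hypothesis[i]:
--             return (i, reference[i])
--     # overlap matches entirely; if the reference is longer, A reports its last word
--     if len(reference) > len(hypothesis):
--         j = len(reference) - 1
--         return (j, reference[j])
--     return (0, '')
-- ===== Notes on version B (the rewrite author's own statement) =====
-- stated objective: faster
-- what changed: Replaces A's full left-to-right loop (which re-compares the whole reference[:len(hypothesis)] prefix slice inside the loop body) with a single backward scan over the overlap that returns at the last mismatch, plus one length comparison for the longer-reference case.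
import Mathlib
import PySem

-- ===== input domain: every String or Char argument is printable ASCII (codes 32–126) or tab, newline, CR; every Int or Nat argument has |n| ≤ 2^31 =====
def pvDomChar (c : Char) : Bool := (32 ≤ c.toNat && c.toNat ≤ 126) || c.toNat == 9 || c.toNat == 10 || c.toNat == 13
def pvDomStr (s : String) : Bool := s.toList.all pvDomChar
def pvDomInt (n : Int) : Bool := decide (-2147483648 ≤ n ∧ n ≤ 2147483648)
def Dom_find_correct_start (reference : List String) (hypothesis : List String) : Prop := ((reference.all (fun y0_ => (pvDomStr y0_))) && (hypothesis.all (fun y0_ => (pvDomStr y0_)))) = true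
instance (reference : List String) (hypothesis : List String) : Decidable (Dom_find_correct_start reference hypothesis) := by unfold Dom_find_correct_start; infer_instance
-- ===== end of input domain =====

-- B replaces A's forward loop with its per-iteration prefix-slice re-comparison by one backward
-- scan over the overlap plus a single length check; the return values are proved equal on all inputs.


-- ===== PORT A =====
-- zip(range(len(reference)), reference) is exactly PySem.List.enumerate reference.
-- hypothesis[i] and reference[i] are in range under their guards (0 ≤ i < length), so pyGetD is exact there.
def find_correct_start (reference : List String) (hypothesis : List String) : Int × String :=
  (PySem.List.enumerate reference).foldl
    (fun mismatch iw =>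
      if (hypothesis.length : Int) ≥ iw.1 + 1 ∧ iw.2 ≠ PySem.List.pyGetD hypothesis iw.1 "" then
        (iw.1, iw.2)
      else if (hypothesis.length : Int) < iw.1 + 1 ∧
              PySem.List.slice reference none (some (hypothesis.length : Int)) = hypothesis then
        (iw.1, PySem.List.pyGetD reference iw.1 "")
      else mismatch)
    (0, "")

-- ===== PORT B =====
-- the `while i > 0: i -= 1; …` backward scan of Source B; indices are in range (i < min of the lengths)
def altScan (reference : List String) (hypothesis : List String) : Nat → Option (Int × String)
  | 0 => none
  | i + 1 =>
      if reference.getD i "" ≠ hypothesis.getD i "" then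
        some ((i : Int), reference.getD i "")
      else altScan reference hypothesis i

def find_correct_start_alt (reference : List String) (hypothesis : List String) : Int × String :=
  match altScan reference hypothesis (min reference.length hypothesis.length) with
  | some p => p
  | none =>
      if hypothesis.length < reference.length then
        ((reference.length : Int) - 1, reference.getD (reference.length - 1) "")
      else (0, "")

-- ===== PRECONDITION & SPEC =====
def Spec_find_correct_start (reference : List String) (hypothesis : List String) (out : Int × String) : Prop := out = find_correct_start_alt reference hypothesis
instance (reference : List String) (hypothesis : List String) (out : Int × String) : Decidable (Spec_find_correct_start reference hypothesis out) := by unfold Spec_find_correct_start; infer_instance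

-- ===== CLAIM (what is proved, stated in full; the proofs are below) =====
def Claim_equal_find_correct_start : Prop := ∀ (reference : List String) (hypothesis : List String), Dom_find_correct_start reference hypothesis → Spec_find_correct_start reference hypothesis (find_correct_start reference hypothesis)

-- ===== LEMMAS AND PROOFS =====

-- what A's loop body contributes at one position (none = `mismatch` left untouched)
def gA (r h : List String) (p : Int × String) : Option (Int × String) :=
  if (h.length : Int) ≥ p.1 + 1 ∧ p.2 ≠ PySem.List.pyGetD h p.1 "" then
    some (p.1, p.2)
  else if (h.length : Int) < p.1 + 1 ∧ PySem.List.slice r none (some (h.length : Int)) = h then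
    some (p.1, PySem.List.pyGetD r p.1 "")
  else none

-- B's per-index contribution
def gB (r h : List String) (k : Nat) : Option (Int × String) :=
  if r.getD k "" ≠ h.getD k "" then some ((k : Int), r.getD k "") else none

lemma foldl_getD_eq_getLast {α β : Type} (l : List α) (g : α → Option β) (init : β) :
    l.foldl (fun s p => (g p).getD s) init = ((l.filterMap g).getLast?).getD init := by
  induction l generalizing init with
  | nil => simp
  | cons a l ih =>
      simp only [List.foldl_cons, List.filterMap_cons]
      cases hga : g a with
      | none => simpa using ih init
      | some v =>
          rw [ih]
          cases hrl : (l.filterMap g).getLast? with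
          | none =>
              have : l.filterMap g = [] := List.getLast?_eq_none_iff.mp hrl
              simp [this]
          | some w =>
              have hne : l.filterMap g ≠ [] := by
                intro hnil; rw [hnil] at hrl; simp at hrl
              obtain ⟨x, t, hx⟩ := List.exists_cons_of_ne_nil hne
              rw [hx] at hrl ⊢
              rw [List.getLast?_cons_cons, hrl]
              rfl

lemma enumerate_eq_map_range (r : List String) (s : Int) :
    PySem.List.enumerate r s
      = (List.range r.length).map (fun (k : Nat) => (s + (k : Int), r.getD k "")) := by
  induction r generalizing s with
  | nil => simp [PySem.List.enumerate_nil]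
  | cons a r ih =>
      rw [PySem.List.enumerate_cons, ih]
      simp only [List.length_cons, List.range_succ_eq_map, List.map_cons, List.map_map]
      congr 1
      · simp
      · apply List.map_congr_left
        intro k _
        simp only [Function.comp_apply, List.getD_cons_succ]
        congr 1
        push_cast
        ring

lemma gA_at (r h : List String) (k : Nat) :
    gA r h ((k : Int), r.getD k "") =
      if (k < h.length ∧ r.getD k "" ≠ h.getD k "") ∨ (h.length ≤ k ∧ r.take h.length = h) then
        some ((k : Int), r.getD k "")
      else none := by
  unfold gA
  rw [PySem.List.slice_to_natCast]
  simp only [PySem.List.pyGetD_natCast]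
  by_cases h1 : k < h.length
  · by_cases hne : r.getD k "" = h.getD k ""
    · rw [if_neg (by intro hc; exact hc.2 hne),
          if_neg (by intro hc; omega),
          if_neg (by rintro (⟨_, hc⟩ | ⟨hc, _⟩); exact hc hne; omega)]
    · rw [if_pos ⟨by omega, hne⟩, if_pos (Or.inl ⟨h1, hne⟩)]
  · rw [if_neg (by intro hc; have := hc.1; omega)]
    by_cases hp : r.take h.length = h
    · rw [if_pos ⟨by omega, hp⟩, if_pos (Or.inr ⟨by omega, hp⟩)]
    · rw [if_neg (by intro hc; exact hp hc.2),
          if_neg (by rintro (⟨hc, _⟩ | ⟨_, hc⟩); omega; exact hp hc)]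

lemma gB_pos (r h : List String) (k : Nat) (hm : r.getD k "" ≠ h.getD k "") :
    gB r h k = some ((k : Int), r.getD k "") := by
  unfold gB; rw [if_pos hm]

lemma gB_neg (r h : List String) (k : Nat) (hm : r.getD k "" = h.getD k "") :
    gB r h k = none := by
  unfold gB; rw [if_neg (not_not_intro hm)]

lemma altScan_eq_getLast (r h : List String) (k : Nat) :
    altScan r h k = ((List.range k).filterMap (gB r h)).getLast? := by
  induction k with
  | zero => simp [altScan]
  | succ k ih =>
      rw [List.range_succ, List.filterMap_append]
      unfold altScan
      by_cases hm : r.getD k "" = h.getD k ""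
      · rw [if_neg (not_not_intro hm)]
        have hnil : (List.filterMap (gB r h) [k]) = [] := by
          rw [List.filterMap_cons, gB_neg r h k hm, List.filterMap_nil]
        rw [hnil, List.append_nil, ih]
      · rw [if_pos hm]
        have hone : (List.filterMap (gB r h) [k]) = [((k : Int), r.getD k "")] := by
          rw [List.filterMap_cons, gB_pos r h k hm, List.filterMap_nil]
        rw [hone, List.getLast?_concat]

lemma take_eq_of_agree (r h : List String) (hm : h.length ≤ r.length)
    (hag : ∀ j < h.length, r.getD j "" = h.getD j "") : r.take h.length = h := by
  apply List.ext_getElem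
  · simp [hm]
  · intro j hj1 hj2
    have hj : j < h.length := by simpa using hj2
    have := hag j hj
    rw [List.getD_eq_getElem r "" (by omega), List.getD_eq_getElem h "" hj] at this
    simpa [List.getElem_take] using this

lemma agree_of_take_eq (r h : List String) (hp : r.take h.length = h) :
    ∀ j < h.length, r.getD j "" = h.getD j "" := by
  intro j hj
  have hm : h.length ≤ r.length := by
    have := congrArg List.length hp
    simp at this; omega
  rw [List.getD_eq_getElem r "" (by omega), List.getD_eq_getElem h "" hj,
      List.getElem_of_eq hp.symm hj]
  simp [List.getElem_take]

-- A's fold in last-of-filterMap form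
lemma find_correct_start_eq (r h : List String) :
    find_correct_start r h
      = (((List.range r.length).filterMap
            (fun (k : Nat) => gA r h ((k : Int), r.getD k ""))).getLast?).getD (0, "") := by
  unfold find_correct_start
  have hstep :
      (fun (mismatch : Int × String) (iw : Int × String) =>
        if (h.length : Int) ≥ iw.1 + 1 ∧ iw.2 ≠ PySem.List.pyGetD h iw.1 "" then
          (iw.1, iw.2)
        else if (h.length : Int) < iw.1 + 1 ∧
                PySem.List.slice r none (some (h.length : Int)) = h then
          (iw.1, PySem.List.pyGetD r iw.1 "")
        else mismatch)
      = fun s iw => (gA r h iw).getD s := by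
    funext s iw
    unfold gA
    split_ifs <;> rfl
  rw [hstep, foldl_getD_eq_getLast, enumerate_eq_map_range, List.filterMap_map]
  have hcomp : (gA r h) ∘ (fun (k : Nat) => ((0 : Int) + (k : Int), r.getD k ""))
      = fun (k : Nat) => gA r h ((k : Int), r.getD k "") := by
    funext k
    simp
  rw [hcomp]

-- ===== VERDICT (by name: the statement is the Claim_ definition above) =====
theorem find_correct_start_spec : Claim_equal_find_correct_start := by
  intro r h _
  unfold Spec_find_correct_start
  rw [find_correct_start_eq]
  unfold find_correct_start_alt
  rw [altScan_eq_getLast]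
  by_cases hp : r.take h.length = h
  · -- the hypothesis is a full prefix of the reference
    have hmn : h.length ≤ r.length := by
      have := congrArg List.length hp
      simp at this; omega
    have hag := agree_of_take_eq r h hp
    have hBnil : (List.range (min r.length h.length)).filterMap (gB r h) = [] := by
      rw [List.filterMap_eq_nil_iff]
      intro j hj
      rw [List.mem_range] at hj
      exact gB_neg r h j (hag j (by omega))
    rw [hBnil]
    simp only [List.getLast?_nil]
    by_cases hlt : h.length < r.length
    · rw [if_pos hlt]
      have hr : List.range r.length = List.range (r.length - 1) ++ [r.length - 1] := by
        rw [← List.range_succ]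
        congr 1
        omega
      rw [hr, List.filterMap_append]
      have hlast : (List.filterMap (fun (k : Nat) => gA r h ((k : Int), r.getD k "")) [r.length - 1])
          = [(((r.length - 1 : Nat) : Int), r.getD (r.length - 1) "")] := by
        simp only [List.filterMap_cons, List.filterMap_nil, gA_at]
        rw [if_pos (Or.inr ⟨by omega, hp⟩)]
      rw [hlast, List.getLast?_concat]
      simp only [Option.getD_some]
      congr 1
      omega
    · rw [if_neg hlt]
      have : (List.range r.length).filterMap (fun (k : Nat) => gA r h ((k : Int), r.getD k "")) = [] := by
        rw [List.filterMap_eq_nil_iff]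
        intro j hj
        rw [List.mem_range] at hj
        rw [gA_at]
        rw [if_neg (by rintro (⟨hk, hne⟩ | ⟨hk, _⟩); exact hne (hag j hk); omega)]
      rw [this]
      rfl
  · -- there is a mismatch inside the overlap, or the hypothesis is longer
    have heq : (List.range r.length).filterMap (fun (k : Nat) => gA r h ((k : Int), r.getD k ""))
        = (List.range (min r.length h.length)).filterMap (gB r h) := by
      by_cases hnm : r.length ≤ h.length
      · rw [Nat.min_eq_left hnm]
        apply List.filterMap_congr
        intro j hj
        rw [List.mem_range] at hj
        rw [gA_at, gB]
        by_cases hne : r.getD j "" = h.getD j ""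
        · rw [if_neg (by rintro (⟨_, hc⟩ | ⟨_, hc⟩); exact hc hne; exact hp hc),
              if_neg (not_not_intro hne)]
        · rw [if_pos (Or.inl ⟨by omega, hne⟩), if_pos hne]
      · rw [Nat.min_eq_right (by omega)]
        have hr2 : List.range r.length
            = List.range h.length ++ (List.range (r.length - h.length)).map (h.length + ·) := by
          rw [← List.range_add]
          congr 1
          omega
        rw [hr2, List.filterMap_append]
        have htail : (List.filterMap (fun (k : Nat) => gA r h ((k : Int), r.getD k ""))
            ((List.range (r.length - h.length)).map (h.length + ·))) = [] := by
          rw [List.filterMap_eq_nil_iff]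
          intro p hpmem
          rw [List.mem_map] at hpmem
          obtain ⟨i, _, rfl⟩ := hpmem
          rw [gA_at]
          rw [if_neg (by rintro (⟨hk, _⟩ | ⟨_, hc⟩); omega; exact hp hc)]
        rw [htail, List.append_nil]
        apply List.filterMap_congr
        intro j hj
        rw [List.mem_range] at hj
        rw [gA_at, gB]
        by_cases hne : r.getD j "" = h.getD j ""
        · rw [if_neg (by rintro (⟨_, hc⟩ | ⟨_, hc⟩); exact hc hne; exact hp hc),
              if_neg (not_not_intro hne)]
        · rw [if_pos (Or.inl ⟨by omega, hne⟩), if_pos hne]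
    rw [heq]
    cases hl : ((List.range (min r.length h.length)).filterMap (gB r h)).getLast? with
    | some p => rfl
    | none =>
        have hnil : (List.range (min r.length h.length)).filterMap (gB r h) = [] :=
          List.getLast?_eq_none_iff.mp hl
        have hag : ∀ j < min r.length h.length, r.getD j "" = h.getD j "" := by
          intro j hj
          have hnone := (List.filterMap_eq_nil_iff.mp hnil) j (by rwa [List.mem_range])
          by_contra hne
          rw [gB_pos r h j hne] at hnone
          simp at hnone
        have hle : ¬ h.length < r.length := by
          intro hlt
          exact hp (take_eq_of_agree r h (by omega)
            (fun j hj => hag j (by omega)))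
        rw [if_neg hle]
        rfl
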